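-- pv_equiv track=rewrite | github.com/GyeongyeonAn/Practice_Code | 재귀 메모화.py | func
-- ===== SOURCE A (Python) =====
-- max_sitable = 10
--
-- memo = {}
--
-- def func(remain_people, sit_people):
--
--     key = str([remain_people, sit_people])
--
--     #종료 조건
--     if key in memo:
--         return memo[key]
--     if remain_people < 0:
--         return 0            #무효이므로 0을 리턴
--     if remain_people == 0:
--         return 1            #유효하므로 수를 세기 위해 1을 리턴
--
--     #재귀 처리
--     count = 0
--     for i in range(sit_people, max_sitable + 1):
--          count += func(remain_people - i, i)
--     #메모화 처리
--     memo[key] = count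
--     #종료
--     return count
-- ===== SOURCE B (Python) =====
-- max_sitable = 10
--
-- def func(remain_people, sit_people):
--     # Bottom-up DP over a table instead of recursion + global memo dict.
--     if remain_people < 0:
--         return 0
--     if remain_people == 0:
--         return 1
--     if sit_people > max_sitable:
--         return 0
--     # dp[r][s] = number of ways to seat r people into nondecreasing groups,
--     # each group of size between s and max_sitable (s in 1..max_sitable+1).
--     # Suffix recurrence: dp[r][s] = dp[r][s+1] + dp[r-s][s].
--     dp = [[0] + [1] * (max_sitable + 1)]  # row for 0 remaining people
--     for r in range(1, remain_people + 1):
--         row = [0] * (max_sitable + 2)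
--         for s in range(max_sitable, 0, -1):
--             row[s] = row[s + 1] + (dp[r - s][s] if r >= s else 0)
--         dp.append(row)
--     return dp[remain_people][sit_people]
-- ===== Notes on version B (the rewrite author's own statement) =====
-- stated objective: alternative
-- what changed: Replaced A's top-down recursion with a global string-keyed memo dict by an iterative bottom-up DP table dp[r][s] filled with the suffix recurrence dp[r][s] = dp[r][s+1] + dp[r-s][s], so there is no recursion and no dict at all.
import Mathlib
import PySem

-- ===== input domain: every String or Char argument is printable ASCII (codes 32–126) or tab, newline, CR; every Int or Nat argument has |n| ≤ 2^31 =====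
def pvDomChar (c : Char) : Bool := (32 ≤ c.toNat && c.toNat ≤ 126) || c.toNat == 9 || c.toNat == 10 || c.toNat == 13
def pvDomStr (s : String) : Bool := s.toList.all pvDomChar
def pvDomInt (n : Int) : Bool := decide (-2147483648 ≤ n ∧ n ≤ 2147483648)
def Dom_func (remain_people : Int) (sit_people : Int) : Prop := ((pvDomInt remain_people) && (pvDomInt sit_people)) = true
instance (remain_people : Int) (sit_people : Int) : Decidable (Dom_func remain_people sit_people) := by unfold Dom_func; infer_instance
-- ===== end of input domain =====

-- B replaces A's recursion with a global memo dict by an iterative bottom-up DP table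
-- (suffix recurrence over the minimum part size); equivalence is about the return value
-- (A also mutates the module-level dict `memo`, which B does not keep).

-- ===== PORT A =====
-- A's memoized recursion, with the memo dict threaded through the calls (Python keeps it
-- in a global; a call starting from an empty memo returns the same values). Python keys
-- the memo by str([remain_people, sit_people]), which is in bijection with the pair
-- (remain_people, sit_people); the port keys by the pair itself — exact: same hits and
-- misses. Fuel remain_people.toNat + 1 suffices whenever sit_people ≥ 1 (inside
-- Pre_func); where Python A infinite-recurses, fuel 0 yields a junk value, outside Pre_func.
def funcMemoAux : Nat → Std.HashMap (Int × Int) Int → Int → Int →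
    Int × Std.HashMap (Int × Int) Int
  | 0, memo, _, _ => (0, memo)
  | fuel + 1, memo, r, s =>
    match memo[(r, s)]? with
    | some v => (v, memo)
    | none =>
      if r < 0 then (0, memo)
      else if r = 0 then (1, memo)
      else
        let res := (PySem.List.pyRange s 11 1).foldl
          (fun cm i =>
            let vm := funcMemoAux fuel cm.2 (r - i) i
            (cm.1 + vm.1, vm.2))
          (0, memo)
        (res.1, res.2.insert (r, s) res.1)

def func (remain_people : Int) (sit_people : Int) : Int :=
  (funcMemoAux (remain_people.toNat + 1) ∅ remain_people sit_people).1

-- ===== PORT B =====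
-- row of the dp table for 0 remaining people: dp[0][s] = 1 for s = 1..11
def bRow0 : List Int := 0 :: List.replicate 11 1

-- inner loop: for s in range(10, 0, -1): row[s] = row[s+1] + (dp[r-s][s] if r >= s else 0)
-- indexing ported with List.set/List.getD: exact because every index used is in range
-- (1 ≤ s ≤ 10, rows have length 12, and dp[r-s] is accessed only under the guard s ≤ r).
def bRow (dp : List (List Int)) (r : Int) : List Int :=
  (PySem.List.pyRange 10 0 (-1)).foldl
    (fun row s =>
      row.set s.toNat (row.getD (s.toNat + 1) 0 +
        (if s ≤ r then (dp.getD (r - s).toNat []).getD s.toNat 0 else 0)))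
    (List.replicate 12 0)

def func_alt (remain_people : Int) (sit_people : Int) : Int :=
  if remain_people < 0 then 0
  else if remain_people = 0 then 1
  else if sit_people > 10 then 0
  else
    -- for r in range(1, remain_people + 1): dp.append(row)
    let dp := (PySem.List.pyRange 1 (remain_people + 1) 1).foldl
      (fun dp r => dp ++ [bRow dp r]) [bRow0]
    -- dp[remain_people][sit_people]; the row index is remain_people ≥ 1, in range;
    -- the column index uses pyGetD (Python's indexing incl. negative wrap, default only
    -- where Python raises IndexError).
    PySem.List.pyGetD (dp.getD remain_people.toNat []) sit_people 0

-- ===== PRECONDITION & SPEC =====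
-- Pre_ excludes remain_people > 0 with sit_people ≤ 0: there Python A recurses forever on
-- func(remain_people - 0, 0) and raises RecursionError, returning no value.
def Pre_func (remain_people : Int) (sit_people : Int) : Prop :=
  remain_people ≤ 0 ∨ 1 ≤ sit_people
instance (remain_people : Int) (sit_people : Int) : Decidable (Pre_func remain_people sit_people) := by unfold Pre_func; infer_instance
def pvWitness_func : Int × Int := (7, 2)

def Spec_func (remain_people : Int) (sit_people : Int) (out : Int) : Prop := out = func_alt remain_people sit_people
instance (remain_people : Int) (sit_people : Int) (out : Int) : Decidable (Spec_func remain_people sit_people out) := by unfold Spec_func; infer_instance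

-- ===== CLAIM (what is proved, stated in full; the proofs are below) =====
def Claim_equal_func : Prop := ∀ (remain_people : Int) (sit_people : Int), Dom_func remain_people sit_people → Pre_func remain_people sit_people → Spec_func remain_people sit_people (func remain_people sit_people)

-- ===== LEMMAS AND PROOFS =====

-- the bare (memo-free) recursion of A, used as the reference value in the proofs
def funcAux : Nat → Int → Int → Int
  | 0, _, _ => 0
  | fuel + 1, r, s =>
    if r < 0 then 0
    else if r = 0 then 1
    else (PySem.List.pyRange s 11 1).foldl (fun c i => c + funcAux fuel (r - i) i) 0

def fA (r s : Int) : Int := funcAux (r.toNat + 1) r s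

-- one-step unfolding of funcAux (controls rewriting; `simp [funcAux]` unfolds too deep)
theorem funcAux_succ (f : Nat) (r s : Int) :
    funcAux (f + 1) r s =
      if r < 0 then 0
      else if r = 0 then 1
      else (PySem.List.pyRange s 11 1).foldl (fun c i => c + funcAux f (r - i) i) 0 := rfl

-- fuel irrelevance: any sufficient fuel computes the same value (needs s ≥ 1)
theorem funcAux_fuel : ∀ (f : Nat) (r s : Int), 1 ≤ s → r.toNat < f →
    funcAux f r s = funcAux (r.toNat + 1) r s := by
  intro f
  induction f using Nat.strong_induction_on with
  | _ f ih =>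
    intro r s hs hf
    match f, hf with
    | f + 1, hf =>
      by_cases h0 : r < 0
      · simp [funcAux, h0]
      by_cases h1 : r = 0
      · simp [funcAux, h1]
      · obtain ⟨m, hm⟩ : ∃ m, r.toNat = m + 1 := ⟨r.toNat - 1, by omega⟩
        rw [hm, funcAux_succ f, funcAux_succ (m + 1), if_neg h0, if_neg h0, if_neg h1, if_neg h1]
        apply PySem.List.foldl_congr_mem
        intro acc i hi
        rw [PySem.List.mem_pyRange_one] at hi
        have hi1 : 1 ≤ i := le_trans hs hi.1
        have e1 : funcAux f (r - i) i = funcAux ((r - i).toNat + 1) (r - i) i :=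
          ih f (by omega) _ _ hi1 (by omega)
        have e2 : funcAux (m + 1) (r - i) i = funcAux ((r - i).toNat + 1) (r - i) i :=
          ih (m + 1) (by omega) _ _ hi1 (by omega)
        rw [e1, e2]

theorem fA_neg {r : Int} (s : Int) (h : r < 0) : fA r s = 0 := by
  simp [fA, funcAux, h]

theorem fA_zero (s : Int) : fA 0 s = 1 := by
  simp [fA, funcAux]

theorem fA_top {r s : Int} (hr : 1 ≤ r) (hs : 11 ≤ s) : fA r s = 0 := by
  have h0 : ¬ r < 0 := by omega
  have h1 : r ≠ 0 := by omega
  simp [fA, funcAux, h0, h1, PySem.List.pyRange_one_eq_nil (show (11:Int) ≤ s by omega)]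

-- the suffix recurrence that B's table fills
theorem fA_rec {r s : Int} (hr : 1 ≤ r) (hs : 1 ≤ s) (hs10 : s ≤ 10) :
    fA r s = fA (r - s) s + fA r (s + 1) := by
  have h0 : ¬ r < 0 := by omega
  have h1 : r ≠ 0 := by omega
  have hcons : PySem.List.pyRange s 11 1 = s :: PySem.List.pyRange (s + 1) 11 1 :=
    PySem.List.pyRange_one_cons (by omega)
  show funcAux (r.toNat + 1) r s = _
  rw [funcAux_succ, if_neg h0, if_neg h1, hcons, List.foldl_cons,
    PySem.List.foldl_add]
  have e1 : funcAux r.toNat (r - s) s = fA (r - s) s :=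
    funcAux_fuel r.toNat (r - s) s hs (by omega)
  have e2 : (PySem.List.pyRange (s + 1) 11 1).foldl
      (fun c i => c + funcAux r.toNat (r - i) i) 0 = fA r (s + 1) := by
    show _ = funcAux (r.toNat + 1) r (s + 1)
    rw [funcAux_succ, if_neg h0, if_neg h1]
  rw [← e2, PySem.List.foldl_add]
  simp [e1, fA]

-- the intended content of row r of B's table
def targetRow (r : Int) : List Int :=
  [0, fA r 1, fA r 2, fA r 3, fA r 4, fA r 5, fA r 6,
   fA r 7, fA r 8, fA r 9, fA r 10, fA r 11]

theorem bRow_eq (r : Int) (hr : 1 ≤ r) :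
    bRow ((List.range r.toNat).map (fun j : Nat => targetRow (j : Int))) r = targetRow r := by
  have hrange : PySem.List.pyRange 10 0 (-1) = [10, 9, 8, 7, 6, 5, 4, 3, 2, 1] := by decide
  have key : ∀ s : Int, 1 ≤ s → s ≤ 10 →
      (if s ≤ r then (((List.range r.toNat).map (fun j : Nat => targetRow (j : Int))).getD (r - s).toNat []).getD s.toNat 0 else 0)
        = fA (r - s) s := by
    intro s h1 h10
    by_cases h : s ≤ r
    · rw [if_pos h]
      have hlt : (r - s).toNat < r.toNat := by omega
      have hdp : (((List.range r.toNat).map (fun j : Nat => targetRow (j : Int))).getD (r - s).toNat []) = targetRow (r - s) := by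
        rw [PySem.List.getD_map_range _ _ _ _ hlt]
        congr 1
        omega
      rw [hdp]
      interval_cases s <;> simp [targetRow]
    · rw [if_neg h]
      have hneg : r - s < 0 := by omega
      simp [fA, funcAux, hneg]
  rw [bRow, hrange]
  simp only [List.foldl, key 10 (by omega) (by omega), key 9 (by omega) (by omega),
    key 8 (by omega) (by omega), key 7 (by omega) (by omega), key 6 (by omega) (by omega),
    key 5 (by omega) (by omega), key 4 (by omega) (by omega), key 3 (by omega) (by omega),
    key 2 (by omega) (by omega), key 1 (by omega) (by omega)]
  simp only [show (Int.toNat 10) = 10 from rfl, show (Int.toNat 9) = 9 from rfl,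
    show (Int.toNat 8) = 8 from rfl, show (Int.toNat 7) = 7 from rfl,
    show (Int.toNat 6) = 6 from rfl, show (Int.toNat 5) = 5 from rfl,
    show (Int.toNat 4) = 4 from rfl, show (Int.toNat 3) = 3 from rfl,
    show (Int.toNat 2) = 2 from rfl, show (Int.toNat 1) = 1 from rfl]
  norm_num [List.set, List.getD, targetRow]
  have h11 : fA r 11 = 0 := fA_top hr (by omega)
  have g10 : fA r 10 = fA (r - 10) 10 := by
    rw [fA_rec hr (by omega) (by omega)]; norm_num [h11]
  have g9 : fA r 9 = fA (r - 9) 9 + fA (r - 10) 10 := by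
    rw [fA_rec hr (by omega) (by omega)]; norm_num [g10]
  have g8 : fA r 8 = fA (r - 8) 8 + (fA (r - 9) 9 + fA (r - 10) 10) := by
    rw [fA_rec hr (by omega) (by omega)]; norm_num [g9]
  have g7 : fA r 7 = fA (r - 7) 7 + (fA (r - 8) 8 + (fA (r - 9) 9 + fA (r - 10) 10)) := by
    rw [fA_rec hr (by omega) (by omega)]; norm_num [g8]
  have g6 : fA r 6 = fA (r - 6) 6 + (fA (r - 7) 7 + (fA (r - 8) 8 + (fA (r - 9) 9 + fA (r - 10) 10))) := by
    rw [fA_rec hr (by omega) (by omega)]; norm_num [g7]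
  have g5 : fA r 5 = fA (r - 5) 5 + (fA (r - 6) 6 + (fA (r - 7) 7 + (fA (r - 8) 8 + (fA (r - 9) 9 + fA (r - 10) 10)))) := by
    rw [fA_rec hr (by omega) (by omega)]; norm_num [g6]
  have g4 : fA r 4 = fA (r - 4) 4 + (fA (r - 5) 5 + (fA (r - 6) 6 + (fA (r - 7) 7 + (fA (r - 8) 8 + (fA (r - 9) 9 + fA (r - 10) 10))))) := by
    rw [fA_rec hr (by omega) (by omega)]; norm_num [g5]
  have g3 : fA r 3 = fA (r - 3) 3 + (fA (r - 4) 4 + (fA (r - 5) 5 + (fA (r - 6) 6 + (fA (r - 7) 7 + (fA (r - 8) 8 + (fA (r - 9) 9 + fA (r - 10) 10)))))) := by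
    rw [fA_rec hr (by omega) (by omega)]; norm_num [g4]
  have g2 : fA r 2 = fA (r - 2) 2 + (fA (r - 3) 3 + (fA (r - 4) 4 + (fA (r - 5) 5 + (fA (r - 6) 6 + (fA (r - 7) 7 + (fA (r - 8) 8 + (fA (r - 9) 9 + fA (r - 10) 10))))))) := by
    rw [fA_rec hr (by omega) (by omega)]; norm_num [g3]
  have g1 : fA r 1 = fA (r - 1) 1 + (fA (r - 2) 2 + (fA (r - 3) 3 + (fA (r - 4) 4 + (fA (r - 5) 5 + (fA (r - 6) 6 + (fA (r - 7) 7 + (fA (r - 8) 8 + (fA (r - 9) 9 + fA (r - 10) 10)))))))) := by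
    rw [fA_rec hr (by omega) (by omega)]; norm_num [g2]
  rw [h11, g10, g9, g8, g7, g6, g5, g4, g3, g2, g1]
  norm_num [List.replicate, List.set]
  and_intros <;> ring

theorem dp_fold (n : Nat) :
    (PySem.List.pyRange 1 ((n : Int) + 1) 1).foldl (fun dp r => dp ++ [bRow dp r]) [bRow0]
      = (List.range (n + 1)).map (fun j : Nat => targetRow (j : Int)) := by
  induction n with
  | zero =>
    rw [PySem.List.pyRange_one_eq_nil (by omega)]
    simp only [List.foldl_nil]
    have h0 : targetRow ((0 : Nat) : Int) = bRow0 := by decide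
    rw [List.range_one, List.map_cons, List.map_nil, h0]
  | succ n ih =>
    rw [show (((n + 1 : Nat)) : Int) + 1 = ((n : Int) + 1) + 1 by push_cast; ring]
    rw [PySem.List.pyRange_one_succ_right (by omega), List.foldl_append]
    simp only [List.foldl_cons, List.foldl_nil]
    rw [ih]
    have hcast : ((n : Int) + 1).toNat = n + 1 := by omega
    have := bRow_eq ((n : Int) + 1) (by omega)
    rw [hcast] at this
    rw [this, show List.range (n + 1 + 1) = List.range (n + 1) ++ [n + 1] from List.range_succ,
      List.map_append]
    simp only [List.map_cons, List.map_nil]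
    push_cast
    rfl


-- the memo only ever holds values of the bare recursion (keys with 1 ≤ s)
def MemoInv (m : Std.HashMap (Int × Int) Int) : Prop :=
  ∀ r s v, m[(r, s)]? = some v → 1 ≤ s ∧ v = fA r s

theorem memoInv_empty : MemoInv ∅ := by
  intro r s v h
  simp at h

theorem funcMemo_correct : ∀ (fuel : Nat) (m : Std.HashMap (Int × Int) Int) (r s : Int),
    MemoInv m → 1 ≤ s → r.toNat < fuel →
    (funcMemoAux fuel m r s).1 = fA r s ∧ MemoInv (funcMemoAux fuel m r s).2 := by
  intro fuel
  induction fuel using Nat.strong_induction_on with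
  | _ fuel ih =>
    intro m r s hm hs hf
    match fuel, hf with
    | fuel + 1, hf =>
      show (funcMemoAux (fuel + 1) m r s).1 = fA r s ∧ _
      rw [funcMemoAux]
      cases hhit : m[(r, s)]? with
      | some v =>
        simp only []
        exact ⟨(hm r s v hhit).2, hm⟩
      | none =>
        simp only []
        by_cases h0 : r < 0
        · rw [if_pos h0]
          exact ⟨(fA_neg s h0).symm, hm⟩
        by_cases h1 : r = 0
        · rw [if_neg h0, if_pos h1]
          subst h1
          exact ⟨(fA_zero s).symm, hm⟩
        · rw [if_neg h0, if_neg h1]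
          have hr : 1 ≤ r := by omega
          -- the memoized foldl computes the same sums as the bare one and keeps MemoInv
          have hfold : ∀ (l : List Int), (∀ i ∈ l, 1 ≤ i ∧ (r - i).toNat < fuel) →
              ∀ (p : Int × Std.HashMap (Int × Int) Int), MemoInv p.2 →
              (l.foldl (fun cm i =>
                  let vm := funcMemoAux fuel cm.2 (r - i) i
                  (cm.1 + vm.1, vm.2)) p).1
                = p.1 + (l.foldl (fun c i => c + funcAux r.toNat (r - i) i) 0) ∧
              MemoInv (l.foldl (fun cm i =>
                  let vm := funcMemoAux fuel cm.2 (r - i) i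
                  (cm.1 + vm.1, vm.2)) p).2 := by
            intro l
            induction l with
            | nil =>
              intro _ p hp
              simpa using hp
            | cons i l ihl =>
              intro hmem p hp
              have hi := hmem i (by simp)
              have hrec := ih fuel (by omega) p.2 (r - i) i hp hi.1 hi.2
              have hval : (funcMemoAux fuel p.2 (r - i) i).1 = funcAux r.toNat (r - i) i := by
                rw [hrec.1]
                unfold fA
                exact (funcAux_fuel r.toNat (r - i) i hi.1 (by omega)).symm
              simp only [List.foldl_cons]
              have hnext := ihl (fun j hj => hmem j (by simp [hj]))
                ((p.1 + (funcMemoAux fuel p.2 (r - i) i).1, (funcMemoAux fuel p.2 (r - i) i).2))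
                hrec.2
              refine ⟨?_, hnext.2⟩
              rw [hnext.1, hval, PySem.List.foldl_add, PySem.List.foldl_add]
              ring
          have hb : ∀ i ∈ PySem.List.pyRange s 11 1, 1 ≤ i ∧ (r - i).toNat < fuel := by
            intro i hi
            rw [PySem.List.mem_pyRange_one] at hi
            constructor
            · omega
            · omega
          have hres := hfold (PySem.List.pyRange s 11 1) hb (0, m) hm
          constructor
          · show ((PySem.List.pyRange s 11 1).foldl _ (0, m)).1 = fA r s
            rw [hres.1]
            unfold fA
            rw [funcAux_succ, if_neg h0, if_neg h1]
            ring
          · -- inserting the freshly computed value keeps the invariant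
            intro r' s' v hv
            rw [Std.HashMap.getElem?_insert] at hv
            by_cases hk : ((r, s) == (r', s')) = true
            · rw [if_pos hk] at hv
              have hpair : r = r' ∧ s = s' := by
                simpa using hk
              obtain ⟨hr1, hs1⟩ := hpair
              subst hr1; subst hs1
              refine ⟨hs, ?_⟩
              cases hv
              rw [hres.1]
              unfold fA
              rw [funcAux_succ, if_neg h0, if_neg h1]
              ring
            · rw [if_neg hk] at hv
              exact hres.2 r' s' v hv

theorem func_eq_fA (r s : Int) (hs : 1 ≤ s) : func r s = fA r s :=
  (funcMemo_correct (r.toNat + 1) ∅ r s memoInv_empty hs (by omega)).1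

theorem func_base (r s : Int) (hr : r ≤ 0) : func r s = fA r s := by
  by_cases h0 : r < 0
  · show (funcMemoAux (r.toNat + 1) ∅ r s).1 = fA r s
    rw [funcMemoAux]
    simp [h0, fA_neg s h0]
  · have h1 : r = 0 := by omega
    subst h1
    show (funcMemoAux 1 ∅ 0 s).1 = fA 0 s
    rw [funcMemoAux]
    simp [fA_zero]

-- ===== VERDICT (by name: the statement is the Claim_ definition above) =====
theorem func_spec : Claim_equal_func := by
  intro r s _ hpre
  show func r s = func_alt r s
  by_cases h0 : r < 0
  · rw [func_base r s (by omega), fA_neg s h0]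
    simp [func_alt, h0]
  by_cases h1 : r = 0
  · subst h1
    rw [func_base 0 s (by omega), fA_zero]
    simp [func_alt]
  · have hr : 1 ≤ r := by omega
    have hs : 1 ≤ s := by
      rcases hpre with h | h
      · omega
      · exact h
    rw [func_eq_fA r s hs]
    by_cases h10 : s > 10
    · rw [fA_top hr (by omega)]
      simp [func_alt, h0, h1, h10]
    · simp only [func_alt, if_neg h0, if_neg h1, if_neg h10]
      have hc : ((r.toNat : Int)) = r := by omega
      have hd := dp_fold r.toNat
      rw [hc] at hd
      rw [hd, PySem.List.getD_map_range _ _ _ _ (by omega : r.toNat < r.toNat + 1), hc]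
      interval_cases s <;> simp [targetRow, PySem.List.pyGetD]
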